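-- pv_equiv track=rewrite | github.com/JocoPurnomoJP/AiArtImpostorCheckIncantation | AiArtImpostorCheckIncantation.py | lengthDoubleByteStr
-- ===== SOURCE A (Python) =====
-- import unicodedata #全角文字列計算
--
-- def lengthDoubleByteStr(text):
--     """ 全角・半角を区別して文字列の長さを返す """
--     count = 0
--     for c in text:
--         # 全角文字などの２バイト文字は'F','W','A'のいずれかに当てはまるとする
--         if unicodedata.east_asian_width(c) in 'FWA':
--             count += 2
--         else:
--             count += 1
--     return count
-- ===== SOURCE B (Python) =====
-- import unicodedata
--
--
-- def lengthDoubleByteStr(text):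
--     """ 全角・半角を区別して文字列の長さを返す """
--     # divide-and-conquer: split the string in half and recurse;
--     # a single character contributes 2 if full-width/wide/ambiguous, else 1.
--     n = len(text)
--     if n == 0:
--         return 0
--     if n == 1:
--         return 2 if unicodedata.east_asian_width(text) in 'FWA' else 1
--     m = n // 2
--     return lengthDoubleByteStr(text[:m]) + lengthDoubleByteStr(text[m:])
-- ===== Notes on version B (the rewrite author's own statement) =====
-- stated objective: alternative
-- what changed: Replaces A's left-to-right accumulator loop by a divide-and-conquer recursion: split the string at its midpoint, recurse on both halves, sum; width is decided only at the single-character base case.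
import Mathlib
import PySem

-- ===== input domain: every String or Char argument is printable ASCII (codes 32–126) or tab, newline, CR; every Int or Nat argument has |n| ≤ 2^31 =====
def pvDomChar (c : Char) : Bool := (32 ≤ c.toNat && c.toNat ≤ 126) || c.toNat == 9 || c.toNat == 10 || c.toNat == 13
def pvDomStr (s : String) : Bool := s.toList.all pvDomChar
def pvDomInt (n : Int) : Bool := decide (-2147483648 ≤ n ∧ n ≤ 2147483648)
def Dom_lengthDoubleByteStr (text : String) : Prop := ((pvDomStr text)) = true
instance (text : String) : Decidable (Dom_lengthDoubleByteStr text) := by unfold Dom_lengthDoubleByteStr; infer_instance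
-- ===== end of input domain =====

-- B replaces A's left-to-right accumulator loop by a divide-and-conquer recursion
-- (split at the midpoint, recurse on both halves, add) (objective: alternative).

-- unicodedata.east_asian_width, exact on the ASCII domain (codes 32–126 are 'Na',
-- tab/newline/CR and other controls are 'N'); no ASCII character is 'F','W','A' or 'H'.
def pvEastAsianWidth (c : Char) : String :=
  if 32 ≤ c.toNat ∧ c.toNat ≤ 126 then "Na" else "N"

-- Python's `w in 'FWA'` is a substring test
def pvInFWA (w : String) : Bool := decide (w.toList <:+: "FWA".toList)

-- ===== PORT A =====
def lengthDoubleByteStr (text : String) : Int :=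
  text.toList.foldl (fun count c => if pvInFWA (pvEastAsianWidth c) then count + 2 else count + 1) 0

-- ===== PORT B =====
-- Source B's recursion, over the string's characters; text[:m] / text[m:] with
-- 0 ≤ m ≤ len are exactly take/drop.  In the one-character base case Python
-- passes the 1-char string itself to east_asian_width; here that character.
def lengthDoubleByteStrRec (l : List Char) : Int :=
  if l.length = 0 then 0
  else if l.length = 1 then
    if pvInFWA (pvEastAsianWidth (l.headD ' ')) then 2 else 1
  else
    lengthDoubleByteStrRec (l.take (l.length / 2)) + lengthDoubleByteStrRec (l.drop (l.length / 2))
termination_by l.length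
decreasing_by
  · simp only [List.length_take]; omega
  · simp only [List.length_drop]; omega

def lengthDoubleByteStr_alt (text : String) : Int :=
  lengthDoubleByteStrRec text.toList

-- ===== PRECONDITION & SPEC =====
def Spec_lengthDoubleByteStr (text : String) (out : Int) : Prop := out = lengthDoubleByteStr_alt text
instance (text : String) (out : Int) : Decidable (Spec_lengthDoubleByteStr text out) := by unfold Spec_lengthDoubleByteStr; infer_instance

-- ===== CLAIM (what is proved, stated in full; the proofs are below) =====
def Claim_equal_lengthDoubleByteStr : Prop := ∀ (text : String), Dom_lengthDoubleByteStr text → Spec_lengthDoubleByteStr text (lengthDoubleByteStr text)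

-- ===== LEMMAS AND PROOFS =====

def pvWidthOf (c : Char) : Int := if pvInFWA (pvEastAsianWidth c) then 2 else 1

theorem lengthDoubleByteStrRec_eq (l : List Char) :
    lengthDoubleByteStrRec l = (l.map pvWidthOf).sum := by
  fun_induction lengthDoubleByteStrRec l
  case case1 l h0 => simp [List.length_eq_zero_iff.mp h0]
  case case4 l h0 h1 ih1 ih2 =>
    rw [ih1, ih2]
    conv_rhs => rw [← List.take_append_drop (l.length / 2) l]
    simp
  all_goals
    rename_i l h0 h1 hw
    obtain ⟨c, rfl⟩ := List.length_eq_one_iff.mp h1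
    simp only [List.headD_cons] at hw
    simp [pvWidthOf, hw]

theorem foldl_width_eq (l : List Char) (acc : Int) :
    l.foldl (fun count c => if pvInFWA (pvEastAsianWidth c) then count + 2 else count + 1) acc
      = acc + (l.map pvWidthOf).sum := by
  induction l generalizing acc with
  | nil => simp
  | cons c t ih => simp only [List.foldl_cons, List.map_cons, List.sum_cons, ih, pvWidthOf]; ring_nf; split <;> ring

-- ===== VERDICT (by name: the statement is the Claim_ definition above) =====
theorem lengthDoubleByteStr_spec : Claim_equal_lengthDoubleByteStr := by
  intro text _
  unfold Spec_lengthDoubleByteStr lengthDoubleByteStr lengthDoubleByteStr_alt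
  rw [foldl_width_eq, lengthDoubleByteStrRec_eq]
  ring
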